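-- pv_equiv track=rewrite | github.com/Rayz7746/cryptography-toolkit | 3_RC4_BlockCipher/q1a.py | Initialization
-- ===== SOURCE A (Python) =====
-- def Initialization(k:list, n:int):
--     last = 2**n
--     lenk = len(k)
--     # List from 0 to 2^n -1
--     S = [None] * last
--
--     # Key recycle list
--     T = [None] * last
--     for i in range(last):
--         S[i]= i
--         T[i] = k[i%lenk]
--
--     return S,T
-- ===== SOURCE B (Python) =====
-- def Initialization(k: list, n: int):
--     last = 2**n
--     S = []
--     T = []
--     rest = []                 # suffix of the key not yet emitted
--     for i in range(last):
--         if not rest: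
--             rest = list(k)    # refill the queue from the key
--         S.append(i)
--         T.append(rest.pop(0))
--     return S, T
-- ===== Notes on version B (the rewrite author's own statement) =====
-- stated objective: alternative
-- what changed: Replaces preallocated arrays filled by indexed assignment with modulo arithmetic (T[i] = k[i%lenk]) by a single appending pass that consumes a refillable queue of key elements (pop from a working copy, refill when exhausted) — no index arithmetic or modulo at all.
import Mathlib
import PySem

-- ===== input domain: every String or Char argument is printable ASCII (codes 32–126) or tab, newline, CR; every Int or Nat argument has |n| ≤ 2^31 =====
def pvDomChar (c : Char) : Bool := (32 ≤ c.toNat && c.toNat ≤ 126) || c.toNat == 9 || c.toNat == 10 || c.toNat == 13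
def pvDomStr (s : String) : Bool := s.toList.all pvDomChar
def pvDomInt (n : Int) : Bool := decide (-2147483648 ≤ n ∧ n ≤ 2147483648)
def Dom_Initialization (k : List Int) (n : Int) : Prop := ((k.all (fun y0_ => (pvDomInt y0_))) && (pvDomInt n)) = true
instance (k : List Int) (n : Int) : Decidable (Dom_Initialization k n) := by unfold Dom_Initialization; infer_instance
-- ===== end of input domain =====

-- B replaces A's preallocate-and-index loop (S[i]=i, T[i]=k[i%lenk]) by a single appending
-- pass that consumes a refillable queue of key elements (pop the front, refill when empty),
-- with no index arithmetic or modulo (objective: alternative).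

-- ===== PORT A =====
def Initialization (k : List Int) (n : Int) : List Int × List Int :=
  let last : Int := 2 ^ n.toNat          -- 2**n (Pre_ requires 0 ≤ n; Python raises on negative n)
  let lenk : Int := k.length
  -- S = [None]*last; T = [None]*last — placeholder 0, every slot is overwritten by the loop
  let S0 : List Int := List.replicate last.toNat 0
  let T0 : List Int := List.replicate last.toNat 0
  (PySem.List.pyRange 0 last 1).foldl
    (fun (st : List Int × List Int) i =>
      (st.1.set i.toNat i, st.2.set i.toNat (PySem.List.pyGetD k (PySem.Int.mod i lenk) 0)))
    (S0, T0)

-- ===== PORT B =====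
def Initialization_alt (k : List Int) (n : Int) : List Int × List Int :=
  let last : Int := 2 ^ n.toNat
  let st :=
    (PySem.List.pyRange 0 last 1).foldl
      (fun (st : List Int × List Int × List Int) i =>
        let rest := if st.2.2 = [] then k else st.2.2   -- refill the queue from the key
        match PySem.List.pop? rest 0 with               -- rest.pop(0)
        | some (x, rest') => (st.1 ++ [i], st.2.1 ++ [x], rest')
        | none => (st.1 ++ [i], st.2.1, rest))          -- Python raises IndexError here (k = [], outside Pre_)
      ([], [], [])
  (st.1, st.2.1)

-- ===== PRECONDITION & SPEC =====
-- Pre_ excludes exactly the inputs where Python A raises: negative n (2**n is a float,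
-- so [None]*last raises TypeError) and empty k (i % 0 raises ZeroDivisionError).
def Pre_Initialization (k : List Int) (n : Int) : Prop := 0 ≤ n ∧ k ≠ []
instance (k : List Int) (n : Int) : Decidable (Pre_Initialization k n) := by unfold Pre_Initialization; infer_instance
def pvWitness_Initialization : List Int × Int := ([3, 1, 4], 2)
def Spec_Initialization (k : List Int) (n : Int) (out : List Int × List Int) : Prop := out = Initialization_alt k n
instance (k : List Int) (n : Int) (out : List Int × List Int) : Decidable (Spec_Initialization k n out) := by unfold Spec_Initialization; infer_instance

-- ===== CLAIM (what is proved, stated in full; the proofs are below) =====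
def Claim_equal_Initialization : Prop := ∀ (k : List Int) (n : Int), Dom_Initialization k n → Pre_Initialization k n → Spec_Initialization k n (Initialization k n)

-- ===== LEMMAS AND PROOFS =====

-- Folding independent updates of a pair is the pair of the folds.
theorem pv_foldl_prod {α : Type} (l : List α) (g1 g2 : List Int → α → List Int) (a b : List Int) :
    l.foldl (fun (st : List Int × List Int) i => (g1 st.1 i, g2 st.2 i)) (a, b)
      = (l.foldl g1 a, l.foldl g2 b) := by
  induction l generalizing a b with
  | nil => rfl
  | cons x xs ih => simp [List.foldl_cons, ih]

-- A's assignment loop over range(j) fills the first j slots with f.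
theorem pv_foldl_set_range (f : Int → Int) (j : Nat) (l : List Int) (hj : j ≤ l.length) :
    ((List.range j).map (fun m : Nat => (m : Int))).foldl (fun acc i => acc.set i.toNat (f i)) l
      = (List.range j).map (fun m : Nat => f (m : Int)) ++ l.drop j := by
  induction j with
  | zero => simp
  | succ j ih =>
    have hj' : j ≤ l.length := Nat.le_of_succ_le hj
    have hjl : j < l.length := hj
    rw [List.range_succ, List.map_append, List.map_append, List.foldl_append, ih hj']
    have hlen : ((List.range j).map (fun m : Nat => f (m : Int))).length = j := by simp
    simp only [List.map_singleton, List.foldl_cons, List.foldl_nil, Int.toNat_natCast]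
    rw [List.set_append_right _ _ (by omega)]
    rw [hlen, Nat.sub_self, List.drop_eq_getElem_cons hjl]
    simp only [List.set_cons_zero, List.append_assoc, List.singleton_append]

-- the queue remaining before iteration M of B's loop
def pvRest (k : List Int) (M : Nat) : List Int :=
  if M % k.length = 0 then [] else k.drop (M % k.length)

theorem pv_succ_mod (M d : Nat) (hd : 0 < d) :
    (M + 1) % d = if M % d + 1 = d then 0 else M % d + 1 := by
  have h := Nat.div_add_mod M d
  have hlt : M % d < d := Nat.mod_lt M hd
  by_cases hc : M % d + 1 = d
  · rw [if_pos hc]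
    have he : M + 1 = d * (M / d + 1) := by rw [Nat.mul_add, Nat.mul_one]; omega
    rw [he, Nat.mul_mod_right]
  · rw [if_neg hc]
    have : M + 1 = d * (M / d) + (M % d + 1) := by omega
    rw [this, Nat.mul_add_mod]
    exact Nat.mod_eq_of_lt (by omega)

-- B's loop invariant: after M iterations S is range M, T is the first M key values
-- (cyclically), and the queue is the still-unemitted key suffix.
theorem pv_b_loop (k : List Int) (hk : k ≠ []) (M : Nat) :
    ((List.range M).map (fun m : Nat => (m : Int))).foldl
      (fun (st : List Int × List Int × List Int) i =>
        let rest := if st.2.2 = [] then k else st.2.2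
        match PySem.List.pop? rest 0 with
        | some (x, rest') => (st.1 ++ [i], st.2.1 ++ [x], rest')
        | none => (st.1 ++ [i], st.2.1, rest))
      ([], [], [])
      = ((List.range M).map (fun m : Nat => (m : Int)),
         (List.range M).map (fun m : Nat => k.getD (m % k.length) 0),
         pvRest k M) := by
  have hkpos : 0 < k.length := List.length_pos_iff.mpr hk
  induction M with
  | zero => simp [pvRest, Nat.zero_mod]
  | succ M ih =>
    rw [List.range_succ, List.map_append, List.foldl_append, ih]
    set j := M % k.length with hj
    have hjlt : j < k.length := Nat.mod_lt M hkpos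
    have hrest : (if pvRest k M = [] then k else pvRest k M) = k.drop j := by
      unfold pvRest
      by_cases h0 : j = 0
      · rw [← hj, if_pos h0, if_pos rfl, h0, List.drop_zero]
      · rw [← hj, if_neg h0]
        have hne : k.drop j ≠ [] := by
          intro h
          have := List.length_drop (l := k) (i := j)
          rw [h] at this
          simp at this; omega
        rw [if_neg hne]
    simp only [List.map_singleton, List.foldl_cons, List.foldl_nil, hrest]
    rw [List.drop_eq_getElem_cons hjlt, PySem.List.pop?_zero_cons]
    simp only
    refine congrArg₂ _ rfl (congrArg₂ _ ?_ ?_)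
    · rw [List.map_append, List.map_singleton]
      congr 1
      rw [← hj]
      simp [List.getD_eq_getElem?_getD, List.getElem?_eq_getElem hjlt]
    · -- remaining queue after the pop is pvRest k (M+1)
      unfold pvRest
      rw [pv_succ_mod M k.length hkpos, ← hj]
      by_cases hc : j + 1 = k.length
      · rw [if_pos hc, if_pos rfl, hc, List.drop_length]
      · rw [if_neg hc, if_neg (show ¬ j + 1 = 0 by omega)]

-- ===== VERDICT (by name: the statement is the Claim_ definition above) =====
theorem Initialization_spec : Claim_equal_Initialization := by
  intro k n _hdom hpre
  obtain ⟨hn, hk⟩ := hpre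
  unfold Spec_Initialization Initialization Initialization_alt
  simp only
  have hlast : ((2 : Int) ^ n.toNat) = ((2 ^ n.toNat : Nat) : Int) := by push_cast; rfl
  rw [hlast]
  set M : Nat := 2 ^ n.toNat with hM
  have hrange : PySem.List.pyRange 0 ((M : Nat) : Int) 1
      = (List.range M).map (fun m : Nat => (m : Int)) := by
    rw [PySem.List.pyRange_one]
    simp
  rw [hrange, pv_b_loop k hk M]
  simp only [Int.toNat_natCast]
  refine Eq.trans (pv_foldl_prod ((List.range M).map (fun m : Nat => (m : Int)))
      (fun s i => s.set i.toNat i)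
      (fun s i => s.set i.toNat (PySem.List.pyGetD k (PySem.Int.mod i (k.length : Int)) 0))
      (List.replicate M 0) (List.replicate M 0)) ?_
  rw [Prod.mk.injEq]
  constructor
  · -- first component: the S loop builds list(range(M))
    rw [List.foldl_map]
    have h1 := pv_foldl_set_range (fun i => i) M (List.replicate M (0 : Int)) (by simp)
    rw [List.foldl_map] at h1
    simpa using h1
  · -- second component: the T loop builds the cyclic key list of length M
    rw [List.foldl_map]
    have h2 := pv_foldl_set_range
        (fun i => PySem.List.pyGetD k (PySem.Int.mod i (k.length : Int)) 0)
        M (List.replicate M (0 : Int)) (by simp)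
    rw [List.foldl_map] at h2
    rw [h2]
    simp only [List.drop_replicate, Nat.sub_self, List.replicate_zero, List.append_nil]
    refine List.map_congr_left ?_
    intro a ha
    rw [List.mem_range] at ha
    rw [PySem.Int.mod_natCast, PySem.List.pyGetD_natCast]
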